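-- pv_equiv track=rewrite | github.com/jeekim2/algostudy_ind | Problems/Programmers/programmers_완전탐색_3/42842.py | solution
-- ===== SOURCE A (Python) =====
-- def solution(brown, yellow):
--     answer = []
--     sum = brown + yellow
--     temp = []
--     temp_index =[]
--
--     for i in range(2,sum):
--         if sum%i == 0:
--             temp.append(i)
--
--     while len(temp)>2:
--         temp.remove(min(temp))
--         temp.remove(max(temp))
--
--     answer.append(max(temp))
--     answer.append(min(temp))
--
--     return answer
-- ===== SOURCE B (Python) =====
-- def solution(brown, yellow):
--     # Scan divisors upward only to sqrt(sum), keeping the largest divisor w <= sqrt(sum);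
--     # the answer is the factor pair [sum // w, w].
--     s = brown + yellow
--     w = None
--     i = 2
--     while i * i <= s:
--         if s % i == 0:
--             w = i
--         i += 1
--     return [s // w, w]
-- ===== Notes on version B (the rewrite author's own statement) =====
-- stated objective: faster
-- what changed: Instead of collecting every divisor of brown+yellow in (1, sum) and repeatedly deleting min and max until the middle pair remains, B scans only 2..floor(sqrt(sum)) keeping the largest divisor w with w*w <= sum and returns [sum//w, w] directly.
import Mathlib
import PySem

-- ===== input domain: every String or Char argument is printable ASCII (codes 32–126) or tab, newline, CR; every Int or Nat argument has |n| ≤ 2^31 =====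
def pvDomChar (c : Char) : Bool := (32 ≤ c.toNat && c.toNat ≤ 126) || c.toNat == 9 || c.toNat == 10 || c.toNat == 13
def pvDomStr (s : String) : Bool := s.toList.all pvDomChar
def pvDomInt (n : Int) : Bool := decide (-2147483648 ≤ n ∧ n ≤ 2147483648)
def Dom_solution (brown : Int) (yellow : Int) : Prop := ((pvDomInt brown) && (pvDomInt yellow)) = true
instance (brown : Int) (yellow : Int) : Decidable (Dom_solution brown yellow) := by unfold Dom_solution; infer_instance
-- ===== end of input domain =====

-- B replaces A's collect-all-divisors-then-strip-min/max computation by a single scan of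
-- 2..⌊√sum⌋ keeping the largest divisor w with w*w ≤ sum, returning [sum//w, w] directly.

-- ===== PORT A =====
-- helpers cited by solLoop's decreasing_by
theorem minD_mem (l : List Int) (hl : l ≠ []) :
    ((PySem.List.min? l (fun y => y)).getD 0) ∈ l := by
  cases h : PySem.List.min? l (fun y => y) with
  | none => exact absurd ((PySem.List.min?_eq_none_iff _ _).1 h) hl
  | some m => simpa using PySem.List.min?_mem h

theorem maxD_mem (l : List Int) (hl : l ≠ []) :
    ((PySem.List.max? l (fun y => y)).getD 0) ∈ l := by
  cases h : PySem.List.max? l (fun y => y) with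
  | none => exact absurd ((PySem.List.max?_eq_none_iff _ _).1 h) hl
  | some m => simpa using PySem.List.max?_mem h

theorem removeD_eq_erase {l : List Int} {v : Int} (hv : v ∈ l) :
    (PySem.List.remove? l v).getD l = l.erase v := by
  rw [PySem.List.remove?_eq_some_erase l v hv]; rfl

theorem removeD_len {l : List Int} {v : Int} (hv : v ∈ l) :
    ((PySem.List.remove? l v).getD l).length + 1 = l.length := by
  rw [removeD_eq_erase hv, List.length_erase_of_mem hv]
  have := List.length_pos_of_mem hv
  omega

-- 'while len(temp)>2: temp.remove(min(temp)); temp.remove(max(temp))'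
-- (min/max/remove on an empty list would raise in Python; the getD fallbacks are unreachable
-- under the length guard.)
def solLoop (temp : List Int) : List Int :=
  if h : 2 < temp.length then
    let t1 := (PySem.List.remove? temp ((PySem.List.min? temp (fun y => y)).getD 0)).getD temp
    let t2 := (PySem.List.remove? t1 ((PySem.List.max? t1 (fun y => y)).getD 0)).getD t1
    solLoop t2
  else temp
termination_by temp.length
decreasing_by
  have hne : temp ≠ [] := by intro he; simp [he] at h
  have e1 := removeD_len (minD_mem temp hne)
  set t1 := (PySem.List.remove? temp ((PySem.List.min? temp (fun y => y)).getD 0)).getD temp with ht1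
  have hne1 : t1 ≠ [] := by
    intro he; rw [he] at e1; simp at e1; omega
  have e2 := removeD_len (maxD_mem t1 hne1)
  omega

def solution (brown : Int) (yellow : Int) : List Int :=
  let sum := brown + yellow
  let temp := (PySem.List.pyRange 2 sum 1).foldl
      (fun acc i => if PySem.Int.mod sum i == 0 then acc ++ [i] else acc) []
  let temp2 := solLoop temp
  [(PySem.List.max? temp2 (fun y => y)).getD 0, (PySem.List.min? temp2 (fun y => y)).getD 0]

-- ===== PORT B =====
-- 'while i*i <= s: if s % i == 0: w = i; i += 1'
def altLoop (s : Int) (i : Int) (w : Option Int) : Option Int :=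
  if i * i ≤ s then
    altLoop s (i + 1) (if PySem.Int.mod s i == 0 then some i else w)
  else w
termination_by (s + 1 - i).toNat
decreasing_by
  rename_i h
  have hi : i ≤ s := by
    by_cases h0 : i ≤ 0
    · nlinarith
    · nlinarith
  omega

def solution_alt (brown : Int) (yellow : Int) : List Int :=
  let s := brown + yellow
  match altLoop s 2 none with
  | some w => [PySem.Int.floordiv s w, w]
  | none => []   -- Python raises TypeError here (w is None); outside Pre_solution

-- ===== PRECONDITION & SPEC =====
-- Pre_solution: brown+yellow is a composite number ≥ 4 — exactly the inputs on which the
-- Python A returns: on every other input A's 'max(temp)' raises ValueError on the empty list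
-- (and Python B raises TypeError), so no input on which A returns a value is excluded.
def Pre_solution (brown : Int) (yellow : Int) : Prop :=
  4 ≤ brown + yellow ∧ ¬ Nat.Prime (brown + yellow).toNat
instance (brown : Int) (yellow : Int) : Decidable (Pre_solution brown yellow) := by
  unfold Pre_solution; infer_instance
def pvWitness_solution : Int × Int := (5, 3)
def Spec_solution (brown : Int) (yellow : Int) (out : List Int) : Prop := out = solution_alt brown yellow
instance (brown : Int) (yellow : Int) (out : List Int) : Decidable (Spec_solution brown yellow out) := by unfold Spec_solution; infer_instance

-- ===== CLAIM (what is proved, stated in full; the proofs are below) =====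
def Claim_equal_solution : Prop := ∀ (brown : Int) (yellow : Int), Dom_solution brown yellow → Pre_solution brown yellow → Spec_solution brown yellow (solution brown yellow)

-- ===== LEMMAS AND PROOFS =====

-- the divisor list A builds
def divsOf (s : Int) : List Int :=
  (PySem.List.pyRange 2 s 1).filter (fun i => PySem.Int.mod s i == 0)

theorem mem_divsOf {s d : Int} : d ∈ divsOf s ↔ 2 ≤ d ∧ d < s ∧ d ∣ s := by
  unfold divsOf
  simp [List.mem_filter, PySem.List.mem_pyRange_one, PySem.Int.mod_eq_zero_iff_dvd, and_assoc]

theorem pairwise_divsOf (s : Int) : (divsOf s).Pairwise (· < ·) :=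
  (PySem.List.pairwise_lt_pyRange_one 2 s).filter _

-- min(x :: l) = x when x is a lower bound
theorem foldl_min_eq (a : Int) (l : List Int) (h : ∀ y ∈ l, a ≤ y) : l.foldl min a = a := by
  induction l with
  | nil => rfl
  | cons b l ih =>
    have hb : min a b = a := min_eq_left (h b (by simp))
    simpa [hb] using ih (fun y hy => h y (by simp [hy]))

-- max(l ++ [y]) = y when y is an upper bound
theorem foldl_max_last (l : List Int) (a y : Int) (ha : a ≤ y) (h : ∀ z ∈ l, z ≤ y) :
    (l ++ [y]).foldl max a = y := by
  induction l generalizing a with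
  | nil => simpa using max_eq_right ha
  | cons b l ih =>
    have hb : b ≤ y := h b (by simp)
    simpa using ih (max a b) (by omega) (fun z hz => h z (by simp [hz]))

-- erasing y from t ++ [y] removes the last element when y does not occur in t
theorem erase_last (t : List Int) (y : Int) (h : ∀ z ∈ t, z ≠ y) : (t ++ [y]).erase y = t := by
  induction t with
  | nil => simp
  | cons b t ih =>
    have hb : b ≠ y := h b (by simp)
    simpa [List.erase_cons, hb] using ih (fun z hz => h z (by simp [hz]))

theorem solLoop_small (l : List Int) (h : ¬ 2 < l.length) : solLoop l = l := by
  rw [solLoop.eq_def]; simp [h]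

-- one iteration of A's while-loop on a strictly sorted list strips head and last
theorem solLoop_step (x y : Int) (t : List Int) (ht : t ≠ [])
    (hp : (x :: (t ++ [y])).Pairwise (· < ·)) : solLoop (x :: (t ++ [y])) = solLoop t := by
  rcases List.exists_cons_of_ne_nil ht with ⟨t0, t', rfl⟩
  have hx : ∀ z ∈ (t0 :: t') ++ [y], x < z := fun z hz => List.rel_of_pairwise_cons hp hz
  have hp' : ((t0 :: t') ++ [y]).Pairwise (· < ·) := hp.of_cons
  have hub : ∀ z ∈ t0 :: t', z < y :=
    fun z hz => (List.pairwise_append.1 hp').2.2 z hz y (by simp)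
  have hmin : PySem.List.min? (x :: ((t0 :: t') ++ [y])) (fun y => y) = some x := by
    rw [PySem.List.min?_id_cons, foldl_min_eq x _ (fun z hz => le_of_lt (hx z hz))]
  have hrem1 : PySem.List.remove? (x :: ((t0 :: t') ++ [y])) x = some ((t0 :: t') ++ [y]) :=
    PySem.List.remove?_cons_self _ _
  have hmax : PySem.List.max? ((t0 :: t') ++ [y]) (fun y => y) = some y := by
    rw [List.cons_append, PySem.List.max?_id_cons,
      foldl_max_last t' t0 y (le_of_lt (hub t0 (by simp)))
        (fun z hz => le_of_lt (hub z (by simp [hz])))]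
  have hrem2 : PySem.List.remove? ((t0 :: t') ++ [y]) y = some (t0 :: t') := by
    rw [PySem.List.remove?_eq_some_erase _ y (by simp),
      erase_last _ y (fun z hz => ne_of_lt (hub z hz))]
  conv_lhs => rw [solLoop.eq_def]
  have hlen : 2 < (x :: ((t0 :: t') ++ [y])).length := by simp
  rw [dif_pos hlen]
  simp only [hmin, Option.getD_some, hrem1, hmax, hrem2]

-- A's while-loop on a strictly sorted list L ++ M ++ R with |L| = |R| returns the middle M
theorem solLoop_sandwich (L : List Int) : ∀ (M R : List Int),
    (L ++ M ++ R).Pairwise (· < ·) → L.length = R.length → M ≠ [] → M.length ≤ 2 →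
    solLoop (L ++ M ++ R) = M := by
  induction L with
  | nil =>
    intro M R hp hlen hM1 hM2
    have : R = [] := List.eq_nil_of_length_eq_zero hlen.symm
    subst this
    simp only [List.nil_append, List.append_nil]
    exact solLoop_small M (by omega)
  | cons x L' ih =>
    intro M R hp hlen hM1 hM2
    rcases List.eq_nil_or_concat R with rfl | ⟨R', y, rfl⟩
    · simp at hlen
    · simp only [List.concat_eq_append] at hp hlen ⊢
      have heq : (x :: L') ++ M ++ (R' ++ [y]) = x :: ((L' ++ M ++ R') ++ [y]) := by
        simp [List.append_assoc]
      rw [heq] at hp ⊢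
      have htne : L' ++ M ++ R' ≠ [] := by
        intro he
        simp only [List.append_eq_nil_iff] at he
        exact hM1 he.1.2
      rw [solLoop_step x y _ htne hp]
      apply ih M R'
      · exact (List.pairwise_append.1 hp.of_cons).1
      · simp at hlen; omega
      · exact hM1
      · exact hM2

-- a strictly sorted list partitions as (below a) ++ (between a and b) ++ (above b)
theorem sorted_partition (l : List Int) (a b : Int) (hab : a ≤ b)
    (hp : l.Pairwise (· < ·)) :
    l = l.filter (fun x => decide (x < a)) ++ l.filter (fun x => decide (a ≤ x ∧ x ≤ b))
        ++ l.filter (fun x => decide (b < x)) := by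
  induction l with
  | nil => simp
  | cons x t iht =>
    have hx : ∀ z ∈ t, x < z := fun z hz => List.rel_of_pairwise_cons hp hz
    have ih := iht hp.of_cons
    rw [List.filter_cons, List.filter_cons, List.filter_cons]
    by_cases h1 : x < a
    · rw [if_pos (by simpa using h1), if_neg (by simp; omega), if_neg (by simp; omega)]
      simp only [List.cons_append]
      rw [← ih]
    · by_cases h2 : b < x
      · have hf1 : t.filter (fun x => decide (x < a)) = [] :=
          List.filter_eq_nil_iff.2 (fun z hz => by
            have := hx z hz; simp only [decide_eq_true_eq]; omega)
        have hf2 : t.filter (fun x => decide (a ≤ x ∧ x ≤ b)) = [] :=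
          List.filter_eq_nil_iff.2 (fun z hz => by
            have := hx z hz; simp only [decide_eq_true_eq]; omega)
        rw [if_neg (by simp; omega), if_neg (by simp; omega), if_pos (by simpa using h2)]
        rw [hf1, hf2] at ih ⊢
        simp only [List.nil_append] at ih ⊢
        rw [← ih]
      · have hf1 : t.filter (fun x => decide (x < a)) = [] :=
          List.filter_eq_nil_iff.2 (fun z hz => by
            have := hx z hz; simp only [decide_eq_true_eq]; omega)
        rw [if_neg (by simp; omega), if_pos (by simp; omega), if_neg (by simp; omega)]
        rw [hf1] at ih ⊢
        simp only [List.nil_append, List.cons_append] at ih ⊢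
        rw [← ih]

-- a strictly sorted list whose members are exactly {w} is [w]
theorem sorted_eq_single (l : List Int) (w : Int) (hp : l.Pairwise (· < ·))
    (hm : ∀ x, x ∈ l ↔ x = w) : l = [w] := by
  cases l with
  | nil => exact absurd ((hm w).2 rfl) (by simp)
  | cons x t =>
    have hxw : x = w := (hm x).1 (by simp)
    cases t with
    | nil => rw [hxw]
    | cons z t' =>
      exfalso
      have hz : z = w := (hm z).1 (by simp)
      have := List.rel_of_pairwise_cons hp (show z ∈ z :: t' by simp)
      omega

-- a strictly sorted list whose members are exactly {w, q} with w < q is [w, q]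
theorem sorted_eq_pair (l : List Int) (w q : Int) (hwq : w < q) (hp : l.Pairwise (· < ·))
    (hm : ∀ x, x ∈ l ↔ (x = w ∨ x = q)) : l = [w, q] := by
  cases l with
  | nil => exact absurd ((hm w).2 (Or.inl rfl)) (by simp)
  | cons x t =>
    have hxw : x = w := by
      rcases (hm x).1 (by simp) with h | h
      · exact h
      · exfalso
        rcases List.mem_cons.1 ((hm w).2 (Or.inl rfl)) with h' | h'
        · omega
        · have := List.rel_of_pairwise_cons hp h'
          omega
    cases t with
    | nil =>
      exfalso
      have := (hm q).2 (Or.inr rfl)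
      simp at this
      omega
    | cons z t' =>
      have hxz : x < z := List.rel_of_pairwise_cons hp (by simp)
      have hzq : z = q := by
        rcases (hm z).1 (by simp) with h | h
        · omega
        · exact h
      cases t' with
      | nil => rw [hxw, hzq]
      | cons u t'' =>
        exfalso
        have hzu : z < u := List.rel_of_pairwise_cons hp.of_cons (by simp)
        rcases (hm u).1 (by simp) with h | h <;> omega

-- ---- arithmetic of cofactors ----
theorem cof (s d : Int) (hs : 0 < s) (hd : d ∣ s) (h2 : 2 ≤ d) (hds : d < s) :
    (s / d) * d = s ∧ 2 ≤ s / d ∧ s / d < s ∧ (s / d) ∣ s ∧ s / (s / d) = d := by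
  have hmul : (s / d) * d = s := Int.ediv_mul_cancel hd
  have hq0 : 0 < s / d := by nlinarith
  have hq2 : 2 ≤ s / d := by nlinarith
  have hqs : s / d < s := by nlinarith
  have hqdvd : (s / d) ∣ s := ⟨d, hmul.symm⟩
  have hback : s / (s / d) = d := by
    have e3 : (s / (s / d)) * (s / d) = s := Int.ediv_mul_cancel hqdvd
    have e4 : (s / (s / d)) * (s / d) = d * (s / d) := by
      rw [e3, mul_comm d (s / d)]; exact hmul.symm
    exact mul_right_cancel₀ (by omega) e4
  exact ⟨hmul, hq2, hqs, hqdvd, hback⟩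

theorem cof_lt {s d1 d2 : Int} (hs : 0 < s) (h1 : d1 ∣ s) (h2 : d2 ∣ s)
    (hp1 : 0 < d1) (hp2 : 0 < d2) (hlt : d1 < d2) : s / d2 < s / d1 := by
  have e1 : (s / d1) * d1 = s := Int.ediv_mul_cancel h1
  have e2 : (s / d2) * d2 = s := Int.ediv_mul_cancel h2
  have hq2pos : 0 < s / d2 := by nlinarith
  nlinarith [mul_lt_mul_of_pos_left hlt hq2pos]

-- Pre_solution yields a divisor d with 2 ≤ d and d*d ≤ s
theorem pre_divisor {s : Int} (hs4 : 4 ≤ s) (hnp : ¬ Nat.Prime s.toNat) :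
    ∃ d : Int, 2 ≤ d ∧ d * d ≤ s ∧ d ∣ s := by
  set n := s.toNat with hn
  have hsn : s = (n : Int) := by omega
  have hn1 : n ≠ 1 := by omega
  have hp := Nat.minFac_prime hn1
  refine ⟨(Nat.minFac n : Int), ?_, ?_, ?_⟩
  · exact_mod_cast hp.two_le
  · have := Nat.minFac_sq_le_self (n := n) (by omega) hnp
    rw [pow_two] at this
    rw [hsn]
    exact_mod_cast this
  · rw [hsn]
    exact_mod_cast Int.natCast_dvd_natCast.2 (Nat.minFac_dvd n)

-- ---- B's loop computes the largest divisor w with w*w ≤ s ----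
theorem altLoop_none (s : Int) : ∀ (n : Nat) (i : Int) (acc : Option Int),
    (s + 1 - i).toNat ≤ n → (∀ d, i ≤ d → d * d ≤ s → ¬ d ∣ s) →
    altLoop s i acc = acc := by
  intro n
  induction n with
  | zero =>
    intro i acc hn h
    rw [altLoop.eq_def]
    have : ¬ i * i ≤ s := by
      intro hle
      have hi : i ≤ s := by
        by_cases h0 : i ≤ 0
        · nlinarith
        · nlinarith
      omega
    simp [this]
  | succ n ih =>
    intro i acc hn h
    rw [altLoop.eq_def]
    by_cases hle : i * i ≤ s
    · have hi : i ≤ s := by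
        by_cases h0 : i ≤ 0
        · nlinarith
        · nlinarith
      have hmod : ¬ (PySem.Int.mod s i == 0) = true := by
        simp only [beq_iff_eq, PySem.Int.mod_eq_zero_iff_dvd]
        exact h i le_rfl hle
      simp only [hle, if_true, hmod]
      exact ih (i + 1) acc (by omega) (fun d hd => h d (by omega))
    · simp [hle]

theorem altLoop_max (s w : Int) (hsq : w * w ≤ s) (hdvd : w ∣ s) :
    ∀ (n : Nat) (i : Int) (acc : Option Int),
    (s + 1 - i).toNat ≤ n → 0 ≤ i → i ≤ w →
    (∀ d, i ≤ d → d * d ≤ s → d ∣ s → d ≤ w) →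
    altLoop s i acc = some w := by
  intro n
  induction n with
  | zero =>
    intro i acc hn h0 hiw hmax
    exfalso
    have his : i ≤ s := by nlinarith [mul_self_nonneg (w - 1), mul_self_nonneg w]
    have hs0 : 0 ≤ s := le_trans (mul_self_nonneg w) hsq
    omega
  | succ n ih =>
    intro i acc hn h0 hiw hmax
    have his : i ≤ s := by nlinarith [mul_self_nonneg (w - 1), mul_self_nonneg w]
    rw [altLoop.eq_def]
    have hii : i * i ≤ s := by nlinarith
    rw [if_pos hii]
    by_cases hiw' : i = w
    · subst hiw'
      have hmod : (PySem.Int.mod s i == 0) = true := by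
        simp only [beq_iff_eq, PySem.Int.mod_eq_zero_iff_dvd]
        exact hdvd
      rw [if_pos hmod]
      exact altLoop_none s ((s + 1 - (i + 1)).toNat) (i + 1) (some i) le_rfl
        (fun d hd hdsq hddvd => by
          have := hmax d (by omega) hdsq hddvd
          omega)
    · have hlt : i < w := lt_of_le_of_ne hiw hiw'
      exact ih (i + 1) _ (by omega) (by omega) (by omega)
        (fun d hd hdsq hddvd => hmax d (by omega) hdsq hddvd)

theorem solution_spec : Claim_equal_solution := by
  intro brown yellow _ hpre
  show solution brown yellow = solution_alt brown yellow
  obtain ⟨hs4, hnp⟩ := hpre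
  set s := brown + yellow with hsdef
  obtain ⟨d0, hd02, hd0sq, hd0dvd⟩ := pre_divisor hs4 hnp
  have hd0lts : d0 < s := by nlinarith
  -- w = the largest divisor of s with w*w ≤ s
  have hCne : ((Finset.Icc (2:Int) s).filter (fun d => d * d ≤ s ∧ d ∣ s)).Nonempty := by
    refine ⟨d0, ?_⟩
    rw [Finset.mem_filter, Finset.mem_Icc]
    exact ⟨⟨hd02, by omega⟩, hd0sq, hd0dvd⟩
  set w := ((Finset.Icc (2:Int) s).filter (fun d => d * d ≤ s ∧ d ∣ s)).max' hCne with hwdef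
  have hwmem := Finset.max'_mem _ hCne
  rw [Finset.mem_filter, Finset.mem_Icc] at hwmem
  obtain ⟨⟨hw2, hws⟩, hwsq, hwdvd⟩ := hwmem
  rw [← hwdef] at hw2 hws hwsq hwdvd
  have hmax : ∀ d, 2 ≤ d → d * d ≤ s → d ∣ s → d ≤ w := by
    intro d h1 h2' h3
    apply Finset.le_max'
    rw [Finset.mem_filter, Finset.mem_Icc]
    exact ⟨⟨h1, by nlinarith⟩, h2', h3⟩
  have hwlt : w < s := by nlinarith
  obtain ⟨hqmul, hq2, hqs, hqdvd, hqback⟩ := cof s w (by omega) hwdvd hw2 hwlt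
  set q := s / w with hqdef
  have hwq : w ≤ q := by nlinarith
  -- B computes [q, w]
  have hBloop := altLoop_max s w hwsq hwdvd (s + 1 - 2).toNat 2 none le_rfl (by omega) hw2
    (fun d hd => hmax d hd)
  have hB : solution_alt brown yellow = [q, w] := by
    simp only [solution_alt]
    rw [← hsdef, hBloop]
    show [PySem.Int.floordiv s w, w] = [q, w]
    rw [PySem.Int.floordiv_eq_ediv_of_pos (show (0:Int) < w by omega), hqdef]
  -- A builds divsOf s and strips it down
  have hA : solution brown yellow =
      [(PySem.List.max? (solLoop (divsOf s)) (fun y => y)).getD 0,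
       (PySem.List.min? (solLoop (divsOf s)) (fun y => y)).getD 0] := by
    simp only [solution]
    rw [← hsdef, PySem.List.foldl_append_if_eq_filter]
    rw [List.nil_append]
    rfl
  have hpw := pairwise_divsOf s
  have hpart := sorted_partition (divsOf s) w q hwq hpw
  set L := (divsOf s).filter (fun x => decide (x < w)) with hL
  set M := (divsOf s).filter (fun x => decide (w ≤ x ∧ x ≤ q)) with hM
  set R := (divsOf s).filter (fun x => decide (q < x)) with hR
  have hLmem : ∀ x, x ∈ L ↔ (2 ≤ x ∧ x < s ∧ x ∣ s ∧ x < w) := by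
    intro x
    rw [hL, List.mem_filter]
    simp only [mem_divsOf, decide_eq_true_eq]
    tauto
  have hRmem : ∀ x, x ∈ R ↔ (2 ≤ x ∧ x < s ∧ x ∣ s ∧ q < x) := by
    intro x
    rw [hR, List.mem_filter]
    simp only [mem_divsOf, decide_eq_true_eq]
    tauto
  have hMmem : ∀ x, x ∈ M ↔ (x = w ∨ x = q) := by
    intro x
    rw [hM, List.mem_filter]
    simp only [mem_divsOf, decide_eq_true_eq]
    constructor
    · rintro ⟨⟨h2x, hxs, hxdvd⟩, hwx, hxq⟩
      by_cases hxx : x * x ≤ s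
      · left
        have := hmax x h2x hxx hxdvd
        omega
      · right
        obtain ⟨hxmul, hx2', hxs', hxdvd', hxback⟩ := cof s x (by omega) hxdvd h2x hxs
        have he_lt : s / x < x :=
          lt_of_mul_lt_mul_right (by rw [hxmul]; exact not_le.mp hxx) (by omega)
        have hee : (s / x) * (s / x) ≤ s :=
          le_of_le_of_eq (mul_le_mul_of_nonneg_left he_lt.le (by omega)) hxmul
        have hew : s / x ≤ w := hmax (s / x) hx2' hee hxdvd'
        by_contra hne
        have hxltq : x < q := lt_of_le_of_ne hxq hne
        have hcl := cof_lt (show (0:Int) < s by omega) hxdvd hqdvd (by omega) (by omega) hxltq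
        rw [hqback] at hcl
        omega
    · rintro (rfl | rfl)
      · exact ⟨⟨hw2, hwlt, hwdvd⟩, le_rfl, hwq⟩
      · exact ⟨⟨hq2, hqs, hqdvd⟩, hwq, le_rfl⟩
  have hMpw : M.Pairwise (· < ·) := by rw [hM]; exact hpw.filter _
  -- |L| = |R| via the bijection d ↦ s / d
  have hLnd : L.Nodup := by rw [hL]; exact (hpw.filter _).imp ne_of_lt
  have hRnd : R.Nodup := by rw [hR]; exact (hpw.filter _).imp ne_of_lt
  have hmapmem : ∀ x, x ∈ L.map (fun d => s / d) ↔ x ∈ R := by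
    intro x
    simp only [List.mem_map]
    constructor
    · rintro ⟨d, hdL, rfl⟩
      obtain ⟨hd2, hds, hddvd, hdw⟩ := (hLmem d).1 hdL
      obtain ⟨hdmul, hd2', hds', hddvd', hdback⟩ := cof s d (by omega) hddvd hd2 hds
      refine (hRmem _).2 ⟨hd2', hds', hddvd', ?_⟩
      have := cof_lt (show (0:Int) < s by omega) hddvd hwdvd (by omega) (by omega) hdw
      omega
    · intro hxR
      obtain ⟨hx2, hxs, hxdvd, hqx⟩ := (hRmem x).1 hxR
      obtain ⟨hxmul, hx2', hxs', hxdvd', hxback⟩ := cof s x (by omega) hxdvd hx2 hxs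
      refine ⟨s / x, (hLmem _).2 ⟨hx2', hxs', hxdvd', ?_⟩, hxback⟩
      have := cof_lt (show (0:Int) < s by omega) hqdvd hxdvd (by omega) (by omega) hqx
      rw [hqback] at this
      omega
  have hmapnd : (L.map (fun d => s / d)).Nodup := by
    refine hLnd.map_on ?_
    intro a ha b hb hfe
    obtain ⟨ha2, has, hadvd, _⟩ := (hLmem a).1 ha
    obtain ⟨hb2, hbs, hbdvd, _⟩ := (hLmem b).1 hb
    have h1 := (cof s a (by omega) hadvd ha2 has).2.2.2.2
    have h2 := (cof s b (by omega) hbdvd hb2 hbs).2.2.2.2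
    rw [← h1, ← h2, hfe]
  have hperm : (L.map (fun d => s / d)).Perm R :=
    List.perm_of_nodup_nodup_toFinset_eq hmapnd hRnd
      (by ext x; simp only [List.mem_toFinset]; exact hmapmem x)
  have hLR : L.length = R.length := by
    have := hperm.length_eq
    simpa using this
  -- assemble
  by_cases hwq' : w = q
  · have hMeq : M = [w] := by
      refine sorted_eq_single M w hMpw (fun x => ?_)
      rw [hMmem x]
      constructor
      · rintro (rfl | rfl)
        · rfl
        · exact hwq'.symm
      · rintro rfl
        exact Or.inl rfl
    have hloop : solLoop (divsOf s) = M := by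
      rw [hpart]
      exact solLoop_sandwich L M R (hpart ▸ hpw) hLR (by rw [hMeq]; simp) (by rw [hMeq]; simp)
    rw [hA, hB, hloop, hMeq]
    rw [PySem.List.max?_id_cons, PySem.List.min?_id_cons]
    simp only [List.foldl_nil, Option.getD_some]
    rw [hwq']
  · have hwltq : w < q := lt_of_le_of_ne hwq hwq'
    have hMeq : M = [w, q] := sorted_eq_pair M w q hwltq hMpw hMmem
    have hloop : solLoop (divsOf s) = M := by
      rw [hpart]
      exact solLoop_sandwich L M R (hpart ▸ hpw) hLR (by rw [hMeq]; simp) (by rw [hMeq]; simp)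
    rw [hA, hB, hloop, hMeq]
    rw [PySem.List.max?_id_cons, PySem.List.min?_id_cons]
    simp only [List.foldl_cons, List.foldl_nil, Option.getD_some]
    rw [max_eq_right (le_of_lt hwltq), min_eq_left (le_of_lt hwltq)]
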